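-- pv_equiv track=rewrite | github.com/facebookresearch/nougat | nougat/postprocessing.py | truncate_repetitions
-- ===== SOURCE A (Python) =====
-- def find_next_punctuation(s: str, start_inx=0):
--     """
--     Find the index of the next punctuation mark
--
--     Args:
--         s: String to examine
--         start_inx: Index where to start
--     """
--
--     chars_to_find = {".", "?", "!", "\n"}
--     for i, char in enumerate(s[start_inx:], start=start_inx):
--         if char in chars_to_find:
--             return i
--
--     return None
--
-- def find_last_punctuation(s: str, start_inx=0):
--     """
--     Find the index of the last punctuation mark before start_inx
--
--     Args:
--         s: String to examine
--         start_inx: Index where to look before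
--     """
--
--     chars_to_find = {".", "?", "!", "\n"}
--     for i, char in enumerate(s[start_inx::-1], start=start_inx):
--         if char in chars_to_find:
--             return i
--
--     return None
--
-- def truncate_repetitions(s: str, min_len=30):
--     """
--     Attempt to truncate repeating segments in the input string.
--
--     This function looks for the longest repeating substring at the end of the input string and truncates
--     it to appear only once. To be considered for removal, repetitions need to be continuous.
--
--     Args:
--         s (str): The input raw prediction to be truncated.
--         min_len (int): The minimum length of the repeating segment.
--
--     Returns:
--         str: The input string with repeated segments truncated.
--     """
--     s_lower = s.lower()
--     s_len = len(s_lower)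
--
--     if s_len < 2 * min_len:
--         return s
--
--     # try to find a length at which the tail is repeating
--     max_rep_len = None
--     for rep_len in range(min_len, int(s_len / 2)):
--         # check if there is a repetition at the end
--         same = True
--         for i in range(0, rep_len):
--             if s_lower[s_len - rep_len - i - 1] != s_lower[s_len - i - 1]:
--                 same = False
--                 break
--
--         if same:
--             max_rep_len = rep_len
--
--     if max_rep_len is None:
--         return s
--
--     lcs = s_lower[-max_rep_len:]
--
--     # remove all but the last repetition
--     st = s
--     st_lower = s_lower
--     while st_lower.endswith(lcs):
--         st = st[:-max_rep_len]
--         st_lower = st_lower[:-max_rep_len]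
--
--     # this is the tail with the repetitions
--     repeating_tail = s_lower[len(st_lower) :]
--
--     # add until next punctuation and make sure last sentence is not repeating
--     st_lower_out = st_lower
--     while True:
--         sentence_end = find_next_punctuation(s_lower, len(st_lower_out))
--         sentence_start = find_last_punctuation(s_lower, len(st_lower_out))
--         if sentence_end and sentence_start:
--             sentence = s_lower[sentence_start:sentence_end]
--             st_lower_out = s_lower[: sentence_end + 1]
--             if sentence in repeating_tail:
--                 break
--         else:
--             break
--
--     s_out = s[: len(st_lower_out)]
--
--     return s_out
-- ===== SOURCE B (Python) =====
-- def find_next_punctuation(s: str, start_inx=0):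
--     """Find the index of the next punctuation mark."""
--     chars_to_find = {".", "?", "!", "\n"}
--     for i, char in enumerate(s[start_inx:], start=start_inx):
--         if char in chars_to_find:
--             return i
--     return None
--
--
-- def find_last_punctuation(s: str, start_inx=0):
--     """Find the index of the last punctuation mark before start_inx."""
--     chars_to_find = {".", "?", "!", "\n"}
--     for i, char in enumerate(s[start_inx::-1], start=start_inx):
--         if char in chars_to_find:
--             return i
--     return None
--
--
-- def truncate_repetitions(s: str, min_len=30):
--     """Truncate a repeating tail, found in one pass with a Z-array of the reversed string."""
--     s_lower = s.lower()
--     n = len(s_lower)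
--     if n < 2 * min_len:
--         return s
--
--     # z[i] = length of the longest common prefix of t and t[i:], t = reversed s_lower
--     t = s_lower[::-1]
--     z = [0] * n
--     z[0] = n
--     l = r = 0
--     for i in range(1, n):
--         zi = min(r - i, z[i - l]) if i < r else 0
--         while i + zi < n and t[zi] == t[i + zi]:
--             zi += 1
--         z[i] = zi
--         if i + zi > r:
--             l, r = i, i + zi
--
--     # largest L in [min_len, n // 2) whose tail block of length L repeats right before it
--     L = 0
--     for j in range(min_len, n // 2):
--         if z[j] >= j:
--             L = j
--     if L == 0:
--         return s
--
--     # the tail block of length L occurs k times in a row at the end; keep one copy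
--     k = 1
--     while (k + 1) * L <= n and z[k * L] >= L:
--         k += 1
--     cut = n - k * L
--     repeating_tail = s_lower[cut:]
--
--     # extend the cut to sentence boundaries until the last kept sentence is not repeating
--     while True:
--         sentence_end = find_next_punctuation(s_lower, cut)
--         sentence_start = find_last_punctuation(s_lower, cut)
--         if sentence_end and sentence_start:
--             sentence = s_lower[sentence_start:sentence_end]
--             cut = sentence_end + 1
--             if sentence in repeating_tail:
--                 break
--         else:
--             break
--
--     return s[:cut]
-- ===== Notes on version B (the rewrite author's own statement) =====
-- stated objective: alternative
-- what changed: Replaces A's nested scan over all candidate repetition lengths (each rechecked char-by-char) and its repeated endswith/slice stripping by one Z-array of the reversed lowered string, from which both the longest repeating tail length and the number of trailing copies are read off; the sentence-extension phase reuses the module's punctuation helpers on an index cut instead of rebuilding prefix strings; Pre_ excludes non-positive min_len, outside the natural domain, where A accepts length<=0 repetitions and can return accidental values or diverge.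
-- outside the precondition, e.g. on truncate_repetitions('abcdef', 0): A returns '', B returns 'abcdef'; on truncate_repetitions('', -1): A does not finish within the time limit, B raises IndexError
import Mathlib
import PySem

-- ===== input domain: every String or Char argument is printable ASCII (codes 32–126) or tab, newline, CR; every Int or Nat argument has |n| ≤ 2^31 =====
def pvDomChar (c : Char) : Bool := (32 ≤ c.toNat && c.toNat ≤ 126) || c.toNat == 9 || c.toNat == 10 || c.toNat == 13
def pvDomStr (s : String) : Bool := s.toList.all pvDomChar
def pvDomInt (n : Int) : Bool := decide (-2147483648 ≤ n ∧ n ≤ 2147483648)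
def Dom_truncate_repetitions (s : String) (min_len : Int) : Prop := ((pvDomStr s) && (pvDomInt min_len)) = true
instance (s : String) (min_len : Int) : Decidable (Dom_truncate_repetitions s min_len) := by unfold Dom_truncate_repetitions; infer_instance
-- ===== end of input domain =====

-- B replaces A's nested candidate-length scan and its endswith stripping by one Z-array of
-- the reversed lowered string (objective: alternative algorithm); equivalence is proved for
-- min_len ≥ 1 (Pre_).

-- ===== PORT A =====

-- chars_to_find = {".", "?", "!", "\n"}
def aPunct : PySem.Set Char := PySem.Set.ofList ['.', '?', '!', '\n']

-- 'for i, char in enumerate(seq, start=start): if char in chars_to_find: return i; return None'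
def aScan : List Char → Int → Option Int
  | [], _ => none
  | c :: rest, i => if PySem.Set.contains aPunct c then some i else aScan rest (i + 1)

def find_next_punctuation (s : List Char) (start_inx : Int) : Option Int :=
  aScan (PySem.List.slice s (some start_inx) none) start_inx

-- s[start_inx::-1] is slice? with step -1 (never none since -1 ≠ 0)
def find_last_punctuation (s : List Char) (start_inx : Int) : Option Int :=
  aScan ((PySem.List.slice? s (some start_inx) none (-1)).getD []) start_inx

-- 'while st_lower.endswith(lcs): st = st[:-max_rep_len]; st_lower = st_lower[:-max_rep_len]'
-- (fuel = length + 1 suffices under Pre_: each pass shortens st_lower by max_rep_len ≥ 1)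
def aStrip (lcs : List Char) (mrl : Int) : Nat → List Char × List Char → List Char × List Char
  | 0, st => st
  | f + 1, (st, stl) =>
      if PySem.Chars.endswith stl lcs then
        aStrip lcs mrl f
          (PySem.List.slice st none (some (-mrl)), PySem.List.slice stl none (some (-mrl)))
      else (st, stl)

-- the 'while True' sentence loop; 'if sentence_end and sentence_start' is Python truthiness:
-- both must be non-None AND non-zero.  (fuel: len(st_lower_out) grows strictly each pass)
def aSentLoop (sl tail : List Char) : Nat → List Char → List Char
  | 0, out => out
  | f + 1, out =>
      match find_next_punctuation sl (PySem.List.len out),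
            find_last_punctuation sl (PySem.List.len out) with
      | some se, some ss =>
          if se ≠ 0 ∧ ss ≠ 0 then
            let sentence := PySem.List.slice sl (some ss) (some se)
            let out' := PySem.List.slice sl none (some (se + 1))
            if PySem.Chars.isIn sentence tail then out' else aSentLoop sl tail f out'
          else out
      | _, _ => out

def truncate_repetitions (s : String) (min_len : Int) : String :=
  let sl := PySem.Chars.lower s.toList
  let n : Int := PySem.List.len sl
  if n < 2 * min_len then s
  else
    -- 'for rep_len in range(min_len, int(s_len / 2)):' with the char-by-char inner check
    -- (the inner break only short-circuits; the flag fold computes the same 'same')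
    let maxRep : Option Int :=
      (PySem.List.pyRange min_len (PySem.Int.truncdiv n 2) 1).foldl
        (fun acc repLen =>
          let same := (PySem.List.pyRange 0 repLen 1).foldl
            (fun sm i =>
              if sm then
                if PySem.List.pyGetD sl (n - repLen - i - 1) ' ' ≠
                   PySem.List.pyGetD sl (n - i - 1) ' ' then false else sm
              else sm) true
          if same then some repLen else acc) none
    match maxRep with
    | none => s
    | some mrl =>
        let lcs := PySem.List.slice sl (some (-mrl)) none    -- s_lower[-max_rep_len:]
        let stp := aStrip lcs mrl (sl.length + 1) (s.toList, sl)
        let tail := PySem.List.slice sl (some (PySem.List.len stp.2)) none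
        let out := aSentLoop sl tail (sl.length + 1) stp.2
        String.ofList (PySem.List.slice s.toList none (some (PySem.List.len out)))

-- ===== PORT B =====
-- Source B keeps the module's punctuation helpers (find_next_punctuation / find_last_punctuation
-- above) and calls them on an integer cut position.

-- 'while i + zi < n and t[zi] == t[i + zi]: zi += 1'   (fuel n + 1 suffices)
def bExtend (t : List Char) (i : Nat) : Nat → Nat → Nat
  | 0, zi => zi
  | f + 1, zi =>
      if i + zi < t.length && (t.getD zi ' ' == t.getD (i + zi) ' ') then
        bExtend t i f (zi + 1)
      else zi

-- Z-array of t: z[i] = longest common prefix of t and t[i:].  Source B fills a preallocated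
-- list left to right (z[0] = n, then z[i] = zi in order); ported as sequential append.
def bZ (t : List Char) : List Nat :=
  if t.length = 0 then []
  else
    let n := t.length
    ((List.range' 1 (n - 1)).foldl
      (fun (st : List Nat × Nat × Nat) i =>
        let z := st.1
        let l := st.2.1
        let r := st.2.2
        let zi0 := if i < r then min (r - i) (z.getD (i - l) 0) else 0
        let zi := bExtend t i (n + 1) zi0
        if r < i + zi then (z ++ [zi], i, i + zi) else (z ++ [zi], l, r))
      ([n], 0, 0)).1

-- 'k = 1; while (k+1)*L <= n and z[k*L] >= L: k += 1'   (fuel n + 1 suffices: L ≥ 1)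
def bK (z : List Nat) (n L : Nat) : Nat → Nat → Nat
  | 0, k => k
  | f + 1, k => if (k + 1) * L ≤ n && L ≤ z.getD (k * L) 0 then bK z n L f (k + 1) else k

-- Source B's 'while True' sentence loop over the integer cut (fuel: cut grows strictly)
def bSent (sl tail : List Char) : Nat → Int → Int
  | 0, cut => cut
  | f + 1, cut =>
      match find_next_punctuation sl cut, find_last_punctuation sl cut with
      | some se, some ss =>
          if se ≠ 0 ∧ ss ≠ 0 then
            let sentence := PySem.List.slice sl (some ss) (some se)
            if PySem.Chars.isIn sentence tail then se + 1 else bSent sl tail f (se + 1)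
          else cut
      | _, _ => cut

def truncate_repetitions_alt (s : String) (min_len : Int) : String :=
  let sl := PySem.Chars.lower s.toList
  let n := sl.length
  if (n : Int) < 2 * min_len then s
  else
    let t := sl.reverse               -- s_lower[::-1]
    let z := bZ t
    -- largest L in [min_len, n // 2) with z[L] >= L (0 = none found)
    let L : Int :=
      (PySem.List.pyRange min_len (PySem.Int.floordiv (n : Int) 2) 1).foldl
        (fun acc j => if j ≤ (z.getD j.toNat 0 : Int) then j else acc) 0
    if L = 0 then s
    else
      let k := bK z n L.toNat (n + 1) 1
      let cut : Int := (n : Int) - (k : Int) * L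
      let tail := PySem.List.slice sl (some cut) none     -- s_lower[cut:]
      let cutF := bSent sl tail (n + 1) cut
      String.ofList (PySem.List.slice s.toList none (some cutF))  -- s[:cut]

-- ===== PRECONDITION & SPEC =====
-- Pre_ excludes non-positive min_len, outside the function's natural domain: there A's
-- rep_len loop accepts vacuous (length ≤ 0) repetitions and can return accidental values
-- such as '' (and even diverges, e.g. on ('', -1)).
def Pre_truncate_repetitions (s : String) (min_len : Int) : Prop := 1 ≤ min_len
instance (s : String) (min_len : Int) : Decidable (Pre_truncate_repetitions s min_len) := by
  unfold Pre_truncate_repetitions; infer_instance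

def pvWitness_truncate_repetitions : String × Int := ("an apple. an apple. an apple. yes", 6)

def Spec_truncate_repetitions (s : String) (min_len : Int) (out : String) : Prop :=
  out = truncate_repetitions_alt s min_len
instance (s : String) (min_len : Int) (out : String) :
    Decidable (Spec_truncate_repetitions s min_len out) := by
  unfold Spec_truncate_repetitions; infer_instance

-- ===== CLAIM (what is proved, stated in full; the proofs are below) =====
def Claim_equal_truncate_repetitions : Prop :=
  ∀ (s : String) (min_len : Int), Dom_truncate_repetitions s min_len →
    Pre_truncate_repetitions s min_len →
    Spec_truncate_repetitions s min_len (truncate_repetitions s min_len)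

-- ===== LEMMAS AND PROOFS =====

-- length of the longest common prefix of two lists
def cpl : List Char → List Char → Nat
  | a :: x, b :: y => if a = b then cpl x y + 1 else 0
  | _, _ => 0

theorem cpl_cons (a b : Char) (x y : List Char) :
    cpl (a :: x) (b :: y) = if a = b then cpl x y + 1 else 0 := rfl

theorem cpl_le_right : ∀ (x y : List Char), cpl x y ≤ y.length := by
  intro x
  induction x with
  | nil => intro y; cases y <;> simp [cpl]
  | cons a x ih =>
      intro y; cases y with
      | nil => simp [cpl]
      | cons b y =>
          simp only [cpl]; split
          · simpa using Nat.succ_le_succ (ih y)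
          · simp

theorem cpl_self : ∀ (x : List Char), cpl x x = x.length := by
  intro x; induction x with
  | nil => simp [cpl]
  | cons a x ih => simp [cpl, ih]

theorem cpl_get : ∀ (x y : List Char), ∀ j < cpl x y, x[j]? = y[j]? := by
  intro x
  induction x with
  | nil => intro y j hj; simp [cpl] at hj
  | cons a x ih =>
      intro y j hj
      cases y with
      | nil => simp [cpl] at hj
      | cons b y =>
          rw [cpl_cons] at hj
          by_cases hab : a = b
          · subst hab; rw [if_pos rfl] at hj
            cases j with
            | zero => simp
            | succ j => simpa using ih y j (by omega)
          · simp [hab] at hj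

theorem cpl_stop : ∀ (x y : List Char), cpl x y < x.length → cpl x y < y.length →
    x[cpl x y]? ≠ y[cpl x y]? := by
  intro x
  induction x with
  | nil => intro y h1 _; simp at h1
  | cons a x ih =>
      intro y h1 h2
      cases y with
      | nil => simp at h2
      | cons b y =>
          by_cases hab : a = b
          · subst hab
            rw [cpl_cons, if_pos rfl] at h1 h2 ⊢
            simp only [List.length_cons] at h1 h2
            simpa using ih y (by omega) (by omega)
          · simp [cpl_cons, hab]

theorem le_cpl_of_get : ∀ (k : Nat) (x y : List Char), k ≤ x.length → k ≤ y.length →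
    (∀ j < k, x[j]? = y[j]?) → k ≤ cpl x y := by
  intro k
  induction k with
  | zero => intro x y _ _ _; omega
  | succ k ih =>
      intro x y hx hy hall
      cases x with
      | nil => simp at hx
      | cons a x =>
          cases y with
          | nil => simp at hy
          | cons b y =>
              have h0 := hall 0 (by omega)
              simp at h0
              rw [cpl_cons, if_pos h0]
              have : k ≤ cpl x y := by
                refine ih x y (by simpa using hx) (by simpa using hy) ?_
                intro j hj
                have := hall (j + 1) (by omega)
                simpa using this
              omega

theorem le_cpl_iff (k : Nat) (x y : List Char) (hx : k ≤ x.length) (hy : k ≤ y.length) :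
    k ≤ cpl x y ↔ ∀ j < k, x[j]? = y[j]? := by
  constructor
  · intro h j hj; exact cpl_get x y j (Nat.lt_of_lt_of_le hj h)
  · exact le_cpl_of_get k x y hx hy

theorem bExtend_eq (t : List Char) (i : Nat) (hi : 1 ≤ i) :
    ∀ (f zi : Nat), zi ≤ cpl t (t.drop i) → cpl t (t.drop i) - zi < f →
      bExtend t i f zi = cpl t (t.drop i) := by
  intro f
  induction f with
  | zero => intro zi _ hf; omega
  | succ f ih =>
      intro zi hzi hf
      have hCr : cpl t (t.drop i) ≤ t.length - i := by
        have := cpl_le_right t (t.drop i); simpa using this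
      rcases Nat.lt_or_ge zi (cpl t (t.drop i)) with hlt | hge
      · have hin : i + zi < t.length := by omega
        have hget : t[zi]? = t[i + zi]? := by
          have := cpl_get t (t.drop i) zi hlt
          rwa [List.getElem?_drop] at this
        have hzin : zi < t.length := by omega
        have heq : t.getD zi ' ' = t.getD (i + zi) ' ' := by
          rw [List.getD_eq_getElem?_getD, List.getD_eq_getElem?_getD, hget]
        have hcond : (i + zi < t.length && (t.getD zi ' ' == t.getD (i + zi) ' ')) = true := by
          simp only [Bool.and_eq_true, decide_eq_true_eq, beq_iff_eq]
          exact ⟨hin, heq⟩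
        rw [bExtend, if_pos hcond]
        exact ih (zi + 1) (by omega) (by omega)
      · have hz : zi = cpl t (t.drop i) := by omega
        subst hz
        rw [bExtend, if_neg]
        intro hcond
        simp only [Bool.and_eq_true, decide_eq_true_eq, beq_iff_eq] at hcond
        obtain ⟨h1, h2⟩ := hcond
        have hlt1 : cpl t (t.drop i) < t.length := by omega
        have hlt2 : cpl t (t.drop i) < (t.drop i).length := by
          simp only [List.length_drop]; omega
        have := cpl_stop t (t.drop i) hlt1 hlt2
        rw [List.getElem?_drop] at this
        apply this
        rw [List.getElem?_eq_getElem hlt1, List.getElem?_eq_getElem (by rw [List.length_drop] at hlt2; omega)]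
        rw [List.getD_eq_getElem?_getD, List.getD_eq_getElem?_getD,
            List.getElem?_eq_getElem hlt1,
            List.getElem?_eq_getElem (show i + cpl t (t.drop i) < t.length by rw [List.length_drop] at hlt2; omega)] at h2
        simpa using h2

-- the loop invariant of Source B's Z construction
def zInv (t : List Char) (st : List Nat × Nat × Nat) (i : Nat) : Prop :=
  st.1.length = i ∧ (∀ j < i, st.1.getD j 0 = cpl t (t.drop j)) ∧ st.2.1 < i ∧
    ((st.2.1 = 0 ∧ st.2.2 = 0) ∨ (1 ≤ st.2.1 ∧ st.2.2 = st.2.1 + cpl t (t.drop st.2.1)))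

theorem zInv_step (t : List Char) (st : List Nat × Nat × Nat) (i : Nat)
    (hInv : zInv t st i) (hi : 1 ≤ i) (hn : i < t.length) :
    zInv t
      (let z := st.1
       let l := st.2.1
       let r := st.2.2
       let zi0 := if i < r then min (r - i) (z.getD (i - l) 0) else 0
       let zi := bExtend t i (t.length + 1) zi0
       if r < i + zi then (z ++ [zi], i, i + zi) else (z ++ [zi], l, r)) (i + 1) := by
  obtain ⟨hlen, hvals, hli, hbox⟩ := hInv
  obtain ⟨z, l, r⟩ := st
  simp only at hlen hvals hli hbox ⊢
  have hCi_le : cpl t (t.drop i) ≤ t.length - i := by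
    have := cpl_le_right t (t.drop i); simpa using this
  have hzi0 : (if i < r then min (r - i) (z.getD (i - l) 0) else 0) ≤ cpl t (t.drop i) := by
    split
    · next hir =>
        rcases hbox with ⟨hl0, hr0⟩ | ⟨hl1, hr⟩
        · omega
        · have hCl_le : cpl t (t.drop l) ≤ t.length - l := by
            have := cpl_le_right t (t.drop l); simpa using this
          have hil : i - l < i := by omega
          have hz_il : z.getD (i - l) 0 = cpl t (t.drop (i - l)) := hvals (i - l) hil
          rw [hz_il]
          apply le_cpl_of_get
          · omega
          · simp only [List.length_drop]; omega
          · intro j hj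
            have hj1 : j < cpl t (t.drop (i - l)) := by omega
            have e1 : t[j]? = t[(i - l) + j]? := by
              have := cpl_get t (t.drop (i - l)) j hj1
              rwa [List.getElem?_drop] at this
            have hj2 : (i - l) + j < cpl t (t.drop l) := by omega
            have e2 : t[(i - l) + j]? = t[l + ((i - l) + j)]? := by
              have := cpl_get t (t.drop l) ((i - l) + j) hj2
              rwa [List.getElem?_drop] at this
            rw [List.getElem?_drop, e1, e2]
            congr 1
            omega
    · omega
  have hzi : bExtend t i (t.length + 1) (if i < r then min (r - i) (z.getD (i - l) 0) else 0)
      = cpl t (t.drop i) := bExtend_eq t i hi _ _ hzi0 (by omega)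
  rw [hzi]
  have hgetj : ∀ j < i + 1, (z ++ [cpl t (t.drop i)]).getD j 0 = cpl t (t.drop j) := by
    intro j hj
    rcases Nat.lt_or_ge j i with hji | hji
    · rw [List.getD_eq_getElem?_getD, List.getElem?_append_left (by omega),
          ← List.getD_eq_getElem?_getD]
      exact hvals j hji
    · have hjeq : j = i := by omega
      subst hjeq
      rw [List.getD_eq_getElem?_getD, List.getElem?_append_right (by omega), hlen]
      simp
  split
  · exact ⟨by simp [hlen], hgetj, Nat.lt_succ_self i, Or.inr ⟨hi, rfl⟩⟩
  · refine ⟨by simp [hlen], hgetj, Nat.lt_succ_of_lt hli, ?_⟩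
    rcases hbox with h | h
    · exact Or.inl h
    · exact Or.inr h

theorem zInv_fold (t : List Char) :
    ∀ (m i0 : Nat) (st : List Nat × Nat × Nat), 1 ≤ i0 → i0 + m ≤ t.length → zInv t st i0 →
      zInv t ((List.range' i0 m).foldl
        (fun (st : List Nat × Nat × Nat) i =>
          let z := st.1
          let l := st.2.1
          let r := st.2.2
          let zi0 := if i < r then min (r - i) (z.getD (i - l) 0) else 0
          let zi := bExtend t i (t.length + 1) zi0
          if r < i + zi then (z ++ [zi], i, i + zi) else (z ++ [zi], l, r)) st) (i0 + m) := by
  intro m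
  induction m with
  | zero => intro i0 st _ _ h; simpa using h
  | succ m ih =>
      intro i0 st h1 h2 hInv
      rw [List.range'_succ, List.foldl_cons]
      have := ih (i0 + 1) _ (by omega) (by omega) (zInv_step t st i0 hInv h1 (by omega))
      simpa [Nat.add_assoc, Nat.add_comm 1 m] using this

theorem bZ_spec (t : List Char) :
    (bZ t).length = t.length ∧ ∀ j < t.length, (bZ t).getD j 0 = cpl t (t.drop j) := by
  by_cases h0 : t.length = 0
  · constructor
    · simp [bZ, h0]
    · intro j hj; omega
  · have hInit : zInv t ([t.length], 0, 0) 1 := by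
      refine ⟨by simp, ?_, Nat.zero_lt_one, Or.inl ⟨rfl, rfl⟩⟩
      intro j hj
      have : j = 0 := by omega
      subst this
      simp [cpl_self]
    have := zInv_fold t (t.length - 1) 1 ([t.length], 0, 0) (by omega) (by omega) hInit
    have hfin : (1 + (t.length - 1)) = t.length := by omega
    rw [hfin] at this
    obtain ⟨hl, hv, _, _⟩ := this
    have hbz : bZ t = ((List.range' 1 (t.length - 1)).foldl
        (fun (st : List Nat × Nat × Nat) i =>
          let z := st.1
          let l := st.2.1
          let r := st.2.2
          let zi0 := if i < r then min (r - i) (z.getD (i - l) 0) else 0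
          let zi := bExtend t i (t.length + 1) zi0
          if r < i + zi then (z ++ [zi], i, i + zi) else (z ++ [zi], l, r)) ([t.length], 0, 0)).1 := by
      simp [bZ, h0]
    rw [hbz]
    exact ⟨hl, hv⟩

theorem pyGetD_bridge (sl : List Char) (a : Int) (ha : 0 ≤ a) (hb : a < (sl.length : Int)) :
    sl[a.toNat]? = some (PySem.List.pyGetD sl a ' ') := by
  rw [PySem.List.pyGetD_eq_getElem sl ' ' ha hb, List.getElem?_eq_getElem]

theorem pair_bridge (sl : List Char) (L i : Int) (hL : 1 ≤ L) (h2 : 2 * L < (sl.length : Int))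
    (hi : 0 ≤ i) (hiL : i < L) :
    (PySem.List.pyGetD sl ((sl.length : Int) - L - i - 1) ' ' =
      PySem.List.pyGetD sl ((sl.length : Int) - i - 1) ' ')
    ↔ sl.reverse[i.toNat]? = sl.reverse[L.toNat + i.toNat]? := by
  have hA := pyGetD_bridge sl ((sl.length : Int) - L - i - 1) (by omega) (by omega)
  have hB := pyGetD_bridge sl ((sl.length : Int) - i - 1) (by omega) (by omega)
  rw [List.getElem?_reverse (by omega), List.getElem?_reverse (by omega)]
  have e3 : sl.length - 1 - i.toNat = ((sl.length : Int) - i - 1).toNat := by omega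
  have e4 : sl.length - 1 - (L.toNat + i.toNat) = ((sl.length : Int) - L - i - 1).toNat := by
    omega
  rw [e3, e4, hA, hB]
  simp [eq_comm]

theorem same_iff (sl : List Char) (L : Int) (h1 : 1 ≤ L) (h2 : 2 * L < (sl.length : Int)) :
    (((PySem.List.pyRange 0 L 1).foldl
        (fun sm i =>
          if sm then
            if PySem.List.pyGetD sl (PySem.List.len sl - L - i - 1) ' ' ≠
               PySem.List.pyGetD sl (PySem.List.len sl - i - 1) ' ' then false else sm
          else sm) true) = true)
    ↔ L ≤ (cpl sl.reverse (sl.reverse.drop L.toNat) : Int) := by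
  have hfun : (fun (sm : Bool) (i : Int) =>
      if sm then
        if PySem.List.pyGetD sl (PySem.List.len sl - L - i - 1) ' ' ≠
           PySem.List.pyGetD sl (PySem.List.len sl - i - 1) ' ' then false else sm
      else sm)
      = (fun (sm : Bool) (i : Int) =>
          if !(PySem.List.pyGetD sl ((sl.length : Int) - L - i - 1) ' ' ==
               PySem.List.pyGetD sl ((sl.length : Int) - i - 1) ' ') then false else sm) := by
    funext sm i
    simp only [PySem.List.len_eq]
    cases sm
    · simp
    · by_cases h : PySem.List.pyGetD sl ((sl.length : Int) - L - i - 1) ' ' =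
          PySem.List.pyGetD sl ((sl.length : Int) - i - 1) ' ' <;> simp [h]
  rw [hfun, PySem.List.foldl_if_false_eq]
  simp only [Bool.true_and, Bool.not_eq_true', List.any_eq_false, beq_eq_false_iff_ne, not_not, PySem.List.mem_pyRange_one]
  rw [← Int.toNat_le]
  rw [le_cpl_iff L.toNat sl.reverse (sl.reverse.drop L.toNat)
        (by simp; omega) (by simp; omega)]
  constructor
  · intro hA j hj
    have hmem := hA (j : Int) ⟨by positivity, by omega⟩
    have hb := (pair_bridge sl L (j : Int) h1 h2 (by positivity) (by omega)).mp hmem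
    rw [List.getElem?_drop]
    simpa using hb
  · intro hB i hi
    obtain ⟨hi0, hiL⟩ := hi
    apply (pair_bridge sl L i h1 h2 hi0 hiL).mpr
    have hj := hB i.toNat (by omega)
    rw [List.getElem?_drop] at hj
    exact hj

theorem maxRel (fA : Option Int → Int → Option Int) (fB : Int → Int → Int) (Q : Int → Prop) :
    ∀ (l : List Int) (a : Option Int) (b : Int),
      (∀ j ∈ l, ((∀ acc accb, fA acc j = some j ∧ fB accb j = j) ∧ Q j) ∨
                (∀ acc accb, fA acc j = acc ∧ fB accb j = accb)) →
      ((a = none ∧ b = 0) ∨ (∃ x, a = some x ∧ b = x ∧ Q x)) →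
      ((l.foldl fA a = none ∧ l.foldl fB b = 0) ∨
       (∃ x, l.foldl fA a = some x ∧ l.foldl fB b = x ∧ Q x)) := by
  intro l
  induction l with
  | nil => intro a b _ h; simpa using h
  | cons j l ih =>
      intro a b hmem hrel
      simp only [List.foldl_cons]
      rcases hmem j (by simp) with ⟨hstep, hQ⟩ | hstep
      · rw [(hstep a b).1, (hstep a b).2]
        exact ih (some j) j (fun x hx => hmem x (by simp [hx])) (Or.inr ⟨j, rfl, rfl, hQ⟩)
      · rw [(hstep a b).1, (hstep a b).2]
        exact ih a b (fun x hx => hmem x (by simp [hx])) hrel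

theorem endswith_iff_block (sl : List Char) (M m : Nat) (hM : 1 ≤ M) (hMn : 2 * M ≤ sl.length)
    (hm : 1 ≤ m) (hmn : m * M ≤ sl.length) :
    PySem.Chars.endswith (sl.take (sl.length - m * M)) (sl.drop (sl.length - M)) = true
    ↔ ((m + 1) * M ≤ sl.length ∧ M ≤ cpl sl.reverse (sl.reverse.drop (m * M))) := by
  rw [PySem.Chars.endswith_iff]
  rw [List.suffix_iff_eq_drop]
  have hlen1 : (sl.drop (sl.length - M)).length = M := by
    simp only [List.length_drop]; omega
  have hlen2 : (sl.take (sl.length - m * M)).length = sl.length - m * M := by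
    simp only [List.length_take]; omega
  have hexp : (m + 1) * M = m * M + M := by ring
  by_cases hfit : (m + 1) * M ≤ sl.length
  · have hcpl := le_cpl_iff M sl.reverse (sl.reverse.drop (m * M))
      (by simp only [List.length_reverse]; omega)
      (by simp only [List.length_drop, List.length_reverse]; omega)
    rw [hcpl]
    have hdt : (sl.take (sl.length - m * M)).drop
          ((sl.take (sl.length - m * M)).length - (sl.drop (sl.length - M)).length)
        = (sl.take (sl.length - m * M)).drop (sl.length - (m + 1) * M) := by
      rw [hlen1, hlen2]
      congr 1
      omega
    rw [hdt]
    have hj' : ((sl.drop (sl.length - M))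
          = (sl.take (sl.length - m * M)).drop (sl.length - (m + 1) * M)) →
        ∀ k < M, sl[sl.length - M + k]? = sl[sl.length - (m + 1) * M + k]? := by
      intro heq k hk
      have h1 : (sl.drop (sl.length - M))[k]?
          = ((sl.take (sl.length - m * M)).drop (sl.length - (m + 1) * M))[k]? := by
        rw [heq]
      rw [List.getElem?_drop, List.getElem?_drop, List.getElem?_take] at h1
      rw [h1, if_pos (by omega)]
    constructor
    · intro heq
      refine ⟨hfit, ?_⟩
      intro j hj
      have hk := hj' heq (M - 1 - j) (by omega)
      rw [List.getElem?_drop,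
          List.getElem?_reverse (by omega),
          List.getElem?_reverse (by omega)]
      have e1 : sl.length - 1 - j = sl.length - M + (M - 1 - j) := by omega
      have e2 : sl.length - 1 - (m * M + j) = sl.length - (m + 1) * M + (M - 1 - j) := by omega
      rw [e1, e2, hk]
    · rintro ⟨-, hcp⟩
      apply List.ext_getElem?
      intro k
      rcases Nat.lt_or_ge k M with hk | hk
      · have hcc := hcp (M - 1 - k) (by omega)
        rw [List.getElem?_drop,
            List.getElem?_reverse (by omega),
            List.getElem?_reverse (by omega)] at hcc
        rw [List.getElem?_drop, List.getElem?_drop, List.getElem?_take, if_pos (by omega)]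
        have e1 : sl.length - 1 - (M - 1 - k) = sl.length - M + k := by omega
        have e2 : sl.length - 1 - (m * M + (M - 1 - k)) = sl.length - (m + 1) * M + k := by
          omega
        rw [e1, e2] at hcc
        rw [hcc]
      · rw [List.getElem?_eq_none (by omega),
            List.getElem?_eq_none (by
              simp only [List.length_drop, List.length_take]; omega)]
  · constructor
    · intro heq
      exfalso
      have hll : (sl.drop (sl.length - M)).length =
          ((sl.take (sl.length - m * M)).drop
            ((sl.take (sl.length - m * M)).length - (sl.drop (sl.length - M)).length)).length := by
        rw [← heq]
      simp only [List.length_drop, hlen1, hlen2] at hll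
      omega
    · intro h
      exact absurd h.1 hfit

theorem strip_eq (sl : List Char) (M : Nat) (z : List Nat) (hM : 1 ≤ M)
    (hMn : 2 * M ≤ sl.length)
    (hz : ∀ j < sl.length, z.getD j 0 = cpl sl.reverse (sl.reverse.drop j)) :
    ∀ (fa : Nat), ∀ (fb m : Nat) (stA : List Char), 1 ≤ m → m * M ≤ sl.length →
      sl.length - m * M < fa → sl.length - m * M < fb →
      (aStrip (sl.drop (sl.length - M)) (M : Int) fa (stA, sl.take (sl.length - m * M))).2
        = sl.take (sl.length - (bK z sl.length M fb m) * M) := by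
  intro fa
  induction fa with
  | zero => intro fb m stA _ _ hfa _; omega
  | succ fa ih =>
      intro fb m stA hm hmn hfa hfb
      obtain ⟨fb, rfl⟩ : ∃ fb', fb = fb' + 1 := ⟨fb - 1, by omega⟩
      have hexp : (m + 1) * M = m * M + M := by ring
      rw [aStrip, bK]
      by_cases hcond : (m + 1) * M ≤ sl.length ∧ M ≤ cpl sl.reverse (sl.reverse.drop (m * M))
      · rw [if_pos ((endswith_iff_block sl M m hM hMn hm hmn).mpr hcond)]
        rw [if_pos (by
          simp only [Bool.and_eq_true, decide_eq_true_eq]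
          refine ⟨hcond.1, ?_⟩
          rw [hz (m * M) (by omega)]
          exact hcond.2)]
        have hsl : PySem.List.slice (sl.take (sl.length - m * M)) none (some (-(M : Int)))
            = sl.take (sl.length - (m + 1) * M) := by
          rw [PySem.List.slice_to_neg_natCast _ M (by omega)]
          rw [List.take_take]
          congr 1
          simp
          omega
        rw [hsl]
        exact ih (fb) (m + 1) _ (by omega) (by omega) (by omega) (by omega)
      · rw [if_neg (by
            intro hcontra
            apply hcond
            exact (endswith_iff_block sl M m hM hMn hm hmn).mp hcontra)]
        rw [if_neg (by
          simp only [Bool.and_eq_true, decide_eq_true_eq]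
          intro hcontra
          apply hcond
          refine ⟨hcontra.1, ?_⟩
          have := hcontra.2
          rwa [hz (m * M) (by omega)] at this)]

theorem truncdiv_two (a : Int) (h : 0 ≤ a) :
    PySem.Int.truncdiv a 2 = PySem.Int.floordiv a 2 := by
  rw [PySem.Int.floordiv_eq_ediv_of_pos (by norm_num)]
  exact Int.tdiv_eq_ediv_of_nonneg h

theorem bK_ge (z : List Nat) (n M : Nat) :
    ∀ (f k : Nat), k ≤ bK z n M f k ∧ (k * M ≤ n → (bK z n M f k) * M ≤ n) := by
  intro f
  induction f with
  | zero => intro k; exact ⟨Nat.le_refl k, fun h => h⟩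
  | succ f ih =>
      intro k
      rw [bK]
      split
      · next hcond =>
          simp only [Bool.and_eq_true, decide_eq_true_eq] at hcond
          exact ⟨Nat.le_trans (Nat.le_succ k) (ih (k + 1)).1,
            fun _ => (ih (k + 1)).2 hcond.1⟩
      · exact ⟨Nat.le_refl k, fun h => h⟩

theorem aScan_bounds (i e : Int) : ∀ (l : List Char), aScan l i = some e →
    i ≤ e ∧ e < i + l.length := by
  intro l
  induction l generalizing i with
  | nil => intro h; simp [aScan] at h
  | cons c rest ih =>
      intro h
      rw [aScan] at h
      by_cases hp : PySem.Set.contains aPunct c = true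
      · rw [if_pos hp] at h
        cases h
        simp only [List.length_cons]
        omega
      · rw [if_neg hp] at h
        have := ih (i + 1) h
        simp only [List.length_cons]
        push_cast
        omega

theorem find_next_bounds (sl : List Char) (p : Nat) (e : Int) (hp : p ≤ sl.length)
    (h : find_next_punctuation sl (p : Int) = some e) :
    (p : Int) ≤ e ∧ e < (sl.length : Int) := by
  rw [find_next_punctuation, PySem.List.slice_from_natCast] at h
  have := aScan_bounds (p : Int) e (sl.drop p) h
  simp only [List.length_drop] at this
  omega

-- the sentence loops of the two ports run in lockstep: A keeps the prefix, B its length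
theorem sent_eq (sl tail : List Char) :
    ∀ (f : Nat) (out : List Char) (pos : Nat), out = sl.take pos → pos ≤ sl.length →
      ((aSentLoop sl tail f out).length : Int) = bSent sl tail f (pos : Int) := by
  intro f
  induction f with
  | zero =>
      intro out pos hout hpos
      rw [aSentLoop, bSent, hout]
      simp only [List.length_take]
      omega
  | succ f ih =>
      intro out pos hout hpos
      have hlo : PySem.List.len out = (pos : Int) := by
        rw [PySem.List.len_eq, hout]
        simp only [List.length_take]
        congr 1
        omega
      rw [aSentLoop, bSent, hlo]
      cases he : find_next_punctuation sl (pos : Int) with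
      | none => rw [hout]; simp only [List.length_take]; omega
      | some se =>
          cases hb : find_last_punctuation sl (pos : Int) with
          | none => rw [hout]; simp only [List.length_take]; omega
          | some ss =>
              dsimp only
              by_cases hz : se ≠ 0 ∧ ss ≠ 0
              · rw [if_pos hz, if_pos hz]
                obtain ⟨hse1, hse2⟩ := find_next_bounds sl pos se hpos he
                have hseN : se = ((se.toNat : Nat) : Int) := by omega
                have hout' : PySem.List.slice sl none (some (se + 1))
                    = sl.take (se.toNat + 1) := by
                  rw [show (se + 1) = ((se.toNat + 1 : Nat) : Int) by omega,
                      PySem.List.slice_to_natCast]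
                by_cases hin : PySem.Chars.isIn (PySem.List.slice sl (some ss) (some se)) tail = true
                · rw [if_pos hin, if_pos hin, hout']
                  simp only [List.length_take]
                  omega
                · rw [if_neg hin, if_neg hin, hout']
                  have := ih (sl.take (se.toNat + 1)) (se.toNat + 1) rfl (by omega)
                  rw [this]
                  congr 1
                  omega
              · rw [if_neg hz, if_neg hz, hout]
                simp only [List.length_take]
                omega

theorem strip_full (sl : List Char) (M : Nat) (z : List Nat) (stA : List Char) (hM : 1 ≤ M)
    (hMn : 2 * M ≤ sl.length)
    (hz : ∀ j < sl.length, z.getD j 0 = cpl sl.reverse (sl.reverse.drop j)) :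
    (aStrip (sl.drop (sl.length - M)) (M : Int) (sl.length + 1) (stA, sl)).2
      = sl.take (sl.length - (bK z sl.length M (sl.length + 1) 1) * M) := by
  rw [aStrip, if_pos (by rw [PySem.Chars.endswith_iff]; exact List.drop_suffix _ _)]
  have hsl1 : PySem.List.slice sl none (some (-(M : Int))) = sl.take (sl.length - M) :=
    PySem.List.slice_to_neg_natCast sl M (by omega)
  rw [hsl1]
  have hst := strip_eq sl M z hM hMn hz sl.length (sl.length + 1) 1
    (PySem.List.slice stA none (some (-(M : Int)))) (by omega) (by omega) (by omega) (by omega)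
  rw [Nat.one_mul] at hst
  exact hst

-- ===== VERDICT (by name: the statement is the Claim_ definition above) =====
theorem truncate_repetitions_spec : Claim_equal_truncate_repetitions := by
  intro s min_len hDom hPre
  unfold Pre_truncate_repetitions at hPre
  unfold Spec_truncate_repetitions
  simp only [truncate_repetitions, truncate_repetitions_alt]
  by_cases hshort : PySem.List.len (PySem.Chars.lower s.toList) < 2 * min_len
  · rw [if_pos hshort,
        if_pos (show ((PySem.Chars.lower s.toList).length : Int) < 2 * min_len by
          rwa [PySem.List.len_eq] at hshort)]
  · rw [if_neg hshort,
        if_neg (show ¬ ((PySem.Chars.lower s.toList).length : Int) < 2 * min_len by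
          rwa [PySem.List.len_eq] at hshort)]
    rw [PySem.List.len_eq] at hshort
    have hn2 : 2 * min_len ≤ ((PySem.Chars.lower s.toList).length : Int) := by omega
    have htd : PySem.Int.truncdiv (PySem.List.len (PySem.Chars.lower s.toList)) 2
        = PySem.Int.floordiv ((PySem.Chars.lower s.toList).length : Int) 2 := by
      rw [PySem.List.len_eq]
      exact truncdiv_two _ (by positivity)
    rw [htd]
    have hzspec := bZ_spec (PySem.Chars.lower s.toList).reverse
    have hstep : ∀ j ∈ PySem.List.pyRange min_len
        (PySem.Int.floordiv ((PySem.Chars.lower s.toList).length : Int) 2) 1,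
        ((∀ (acc : Option Int) (accb : Int),
            (fun acc repLen =>
              if (PySem.List.pyRange 0 repLen 1).foldl
                  (fun sm i =>
                    if sm then
                      if PySem.List.pyGetD (PySem.Chars.lower s.toList)
                          (PySem.List.len (PySem.Chars.lower s.toList) - repLen - i - 1) ' ' ≠
                         PySem.List.pyGetD (PySem.Chars.lower s.toList)
                          (PySem.List.len (PySem.Chars.lower s.toList) - i - 1) ' '
                      then false else sm
                    else sm) true
              then some repLen else acc) acc j = some j ∧
            (fun acc j =>
              if j ≤ ((bZ (PySem.Chars.lower s.toList).reverse).getD j.toNat 0 : Int)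
              then j else acc) accb j = j) ∧
          (1 ≤ j ∧ 2 * j < ((PySem.Chars.lower s.toList).length : Int))) ∨
        (∀ (acc : Option Int) (accb : Int),
            (fun acc repLen =>
              if (PySem.List.pyRange 0 repLen 1).foldl
                  (fun sm i =>
                    if sm then
                      if PySem.List.pyGetD (PySem.Chars.lower s.toList)
                          (PySem.List.len (PySem.Chars.lower s.toList) - repLen - i - 1) ' ' ≠
                         PySem.List.pyGetD (PySem.Chars.lower s.toList)
                          (PySem.List.len (PySem.Chars.lower s.toList) - i - 1) ' '
                      then false else sm
                    else sm) true
              then some repLen else acc) acc j = acc ∧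
            (fun acc j =>
              if j ≤ ((bZ (PySem.Chars.lower s.toList).reverse).getD j.toNat 0 : Int)
              then j else acc) accb j = accb) := by
      intro j hj
      rw [PySem.List.mem_pyRange_one] at hj
      rw [PySem.Int.floordiv_eq_ediv_of_pos (by norm_num)] at hj
      have hj1 : 1 ≤ j := le_trans hPre hj.1
      have hj2 : 2 * j < ((PySem.Chars.lower s.toList).length : Int) := by omega
      have hiff := same_iff (PySem.Chars.lower s.toList) j hj1 hj2
      have hzj := hzspec.2 j.toNat (by simp only [List.length_reverse]; omega)
      by_cases hc : j ≤ ((bZ (PySem.Chars.lower s.toList).reverse).getD j.toNat 0 : Int)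
      · refine Or.inl ⟨fun acc accb => ?_, hj1, hj2⟩
        have hcc : j ≤ (cpl (PySem.Chars.lower s.toList).reverse
            ((PySem.Chars.lower s.toList).reverse.drop j.toNat) : Int) := by rw [← hzj]; exact hc
        exact ⟨by simp only [if_pos (hiff.mpr hcc)], by simp only [if_pos hc]⟩
      · refine Or.inr fun acc accb => ?_
        have hcc : ¬ ((PySem.List.pyRange 0 j 1).foldl
            (fun sm i =>
              if sm then
                if PySem.List.pyGetD (PySem.Chars.lower s.toList)
                    (PySem.List.len (PySem.Chars.lower s.toList) - j - i - 1) ' ' ≠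
                   PySem.List.pyGetD (PySem.Chars.lower s.toList)
                    (PySem.List.len (PySem.Chars.lower s.toList) - i - 1) ' '
                then false else sm
              else sm) true) = true := by
          intro hcontra
          apply hc
          rw [hzj]
          exact hiff.mp hcontra
        exact ⟨by simp only [if_neg hcc], by simp only [if_neg hc]⟩
    have hfold := maxRel _ _ (fun x => 1 ≤ x ∧ 2 * x < ((PySem.Chars.lower s.toList).length : Int))
      (PySem.List.pyRange min_len
        (PySem.Int.floordiv ((PySem.Chars.lower s.toList).length : Int) 2) 1)
      none 0 hstep (Or.inl ⟨rfl, rfl⟩)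
    rcases hfold with ⟨hA, hB⟩ | ⟨x, hA, hB, hx⟩
    · rw [hA, hB]
      rfl
    · obtain ⟨hx1, hx2⟩ := hx
      rw [hA, hB]
      rw [if_neg (by omega)]
      dsimp only
      simp only [PySem.List.len_eq]
      -- both sides now proceed with max repetition length x ≥ 1, 2x < n
      have hxM : x = ((x.toNat : Nat) : Int) := by omega
      have hM1 : 1 ≤ x.toNat := by omega
      have hMn : 2 * x.toNat ≤ (PySem.Chars.lower s.toList).length := by omega
      rw [hxM]
      have hlcs : PySem.List.slice (PySem.Chars.lower s.toList) (some (-((x.toNat : Nat) : Int))) none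
          = (PySem.Chars.lower s.toList).drop ((PySem.Chars.lower s.toList).length - x.toNat) :=
        PySem.List.slice_from_neg_natCast _ x.toNat (by omega)
      rw [hlcs]
      have hz' : ∀ j < (PySem.Chars.lower s.toList).length,
          (bZ (PySem.Chars.lower s.toList).reverse).getD j 0
            = cpl (PySem.Chars.lower s.toList).reverse
                ((PySem.Chars.lower s.toList).reverse.drop j) := by
        intro j hjn
        exact hzspec.2 j (by simp only [List.length_reverse]; omega)
      have htonat : ((x.toNat : Nat) : Int).toNat = x.toNat := by omega
      rw [htonat]
      rw [strip_full (PySem.Chars.lower s.toList) x.toNat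
            (bZ (PySem.Chars.lower s.toList).reverse) s.toList hM1 hMn hz']
      have hKge := bK_ge (bZ (PySem.Chars.lower s.toList).reverse)
        (PySem.Chars.lower s.toList).length x.toNat ((PySem.Chars.lower s.toList).length + 1) 1
      have hKM : (bK (bZ (PySem.Chars.lower s.toList).reverse)
          (PySem.Chars.lower s.toList).length x.toNat
          ((PySem.Chars.lower s.toList).length + 1) 1) * x.toNat
            ≤ (PySem.Chars.lower s.toList).length := hKge.2 (by omega)
      -- the two cut positions agree as integers
      have hcut : ((PySem.Chars.lower s.toList).length : Int)
            - ((bK (bZ (PySem.Chars.lower s.toList).reverse)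
                (PySem.Chars.lower s.toList).length x.toNat
                ((PySem.Chars.lower s.toList).length + 1) 1 : Nat) : Int) * ((x.toNat : Nat) : Int)
          = (((PySem.Chars.lower s.toList).length -
              (bK (bZ (PySem.Chars.lower s.toList).reverse)
                (PySem.Chars.lower s.toList).length x.toNat
                ((PySem.Chars.lower s.toList).length + 1) 1) * x.toNat : Nat) : Int) := by
        push_cast
        omega
      rw [hcut]
      have hlent : ((((PySem.Chars.lower s.toList).take
          ((PySem.Chars.lower s.toList).length -
            (bK (bZ (PySem.Chars.lower s.toList).reverse)
              (PySem.Chars.lower s.toList).length x.toNat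
              ((PySem.Chars.lower s.toList).length + 1) 1) * x.toNat)).length : Nat) : Int)
          = (((PySem.Chars.lower s.toList).length -
              (bK (bZ (PySem.Chars.lower s.toList).reverse)
                (PySem.Chars.lower s.toList).length x.toNat
                ((PySem.Chars.lower s.toList).length + 1) 1) * x.toNat : Nat) : Int) := by
        simp only [List.length_take]
        congr 1
        omega
      rw [hlent]
      have hsent := sent_eq (PySem.Chars.lower s.toList)
        (PySem.List.slice (PySem.Chars.lower s.toList)
          (some ((((PySem.Chars.lower s.toList).length -
            (bK (bZ (PySem.Chars.lower s.toList).reverse)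
              (PySem.Chars.lower s.toList).length x.toNat
              ((PySem.Chars.lower s.toList).length + 1) 1) * x.toNat : Nat) : Int))) none)
        ((PySem.Chars.lower s.toList).length + 1)
        ((PySem.Chars.lower s.toList).take
          ((PySem.Chars.lower s.toList).length -
            (bK (bZ (PySem.Chars.lower s.toList).reverse)
              (PySem.Chars.lower s.toList).length x.toNat
              ((PySem.Chars.lower s.toList).length + 1) 1) * x.toNat))
        ((PySem.Chars.lower s.toList).length -
          (bK (bZ (PySem.Chars.lower s.toList).reverse)
            (PySem.Chars.lower s.toList).length x.toNat
            ((PySem.Chars.lower s.toList).length + 1) 1) * x.toNat)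
        rfl (by omega)
      rw [hsent]
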